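-- pv_equiv track=rewrite | github.com/feruzm/x402 | python/x402/extensions/bazaar/server.py | _normalize_wildcard_pattern
-- ===== SOURCE A (Python) =====
-- def _normalize_wildcard_pattern(pattern: str) -> str:
--     """Convert wildcard segments to :var1, :var2, etc. for discovery normalization."""
--     if "*" not in pattern:
--         return pattern
--     counter = 0
--     segments = pattern.split("/")
--     for i, seg in enumerate(segments):
--         if seg == "*":
--             counter += 1
--             segments[i] = f":var{counter}"
--     return "/".join(segments)
-- ===== SOURCE B (Python) =====
-- def _normalize_wildcard_pattern(pattern: str) -> str:
--     """Single left-to-right character scan: a '*' that forms a whole path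
--     segment (slash or string boundary on both sides) becomes :varN."""
--     out = []
--     counter = 0
--     n = len(pattern)
--     for i, c in enumerate(pattern):
--         if c == "*" and (i == 0 or pattern[i - 1] == "/") and (i + 1 == n or pattern[i + 1] == "/"):
--             counter += 1
--             out.append(f":var{counter}")
--         else:
--             out.append(c)
--     return "".join(out)
-- ===== Notes on version B (the rewrite author's own statement) =====
-- stated objective: alternative
-- what changed: Replaces split('/')/enumerate/rebuild-and-join with a single left-to-right character scan that detects whole '*' segments via slash/boundary lookaround and emits the numbered variable in place.
import Mathlib
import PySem

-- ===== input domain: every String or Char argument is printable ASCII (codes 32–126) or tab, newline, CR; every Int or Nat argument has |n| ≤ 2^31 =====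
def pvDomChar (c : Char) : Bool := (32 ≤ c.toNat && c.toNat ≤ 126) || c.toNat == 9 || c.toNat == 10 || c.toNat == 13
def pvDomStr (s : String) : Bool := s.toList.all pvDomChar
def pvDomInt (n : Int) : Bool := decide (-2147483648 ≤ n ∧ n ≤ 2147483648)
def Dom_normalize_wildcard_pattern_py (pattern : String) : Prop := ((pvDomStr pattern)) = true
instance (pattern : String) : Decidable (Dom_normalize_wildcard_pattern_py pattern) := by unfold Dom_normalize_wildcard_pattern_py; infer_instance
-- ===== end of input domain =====

-- B rewrites A's split/renumber/join of path segments as one character scan with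
-- slash/boundary lookaround; same cost, different structure ("alternative").

-- ===== PORT A =====
-- the 'for i, seg in enumerate(segments): if seg == "*": …' loop, carrying the counter
def pvAgo : List (List Char) → Int → List (List Char)
  | [], _ => []
  | s :: rest, counter =>
    if s = ['*'] then (":var".toList ++ PySem.Int.toChars (counter + 1)) :: pvAgo rest (counter + 1)
    else s :: pvAgo rest counter

def normalize_wildcard_pattern_py (pattern : String) : String :=
  if PySem.Str.isIn "*" pattern = false then pattern
  else String.ofList (PySem.Chars.join ['/'] (pvAgo (PySem.Chars.splitOn pattern.toList ['/']) 0))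

-- ===== PORT B =====
-- the 'for i, c in enumerate(pattern)' scan: atB carries "i == 0 or pattern[i-1] == '/'",
-- the lookahead rest.head? is "i + 1 == n or pattern[i+1] == '/'"
def pvBgo : List Char → Bool → Int → List Char
  | [], _, _ => []
  | c :: rest, atB, counter =>
    if c = '*' ∧ atB = true ∧ (rest.head? = none ∨ rest.head? = some '/') then
      (":var".toList ++ PySem.Int.toChars (counter + 1)) ++ pvBgo rest false (counter + 1)
    else c :: pvBgo rest (decide (c = '/')) counter

def normalize_wildcard_pattern_py_alt (pattern : String) : String :=
  String.ofList (pvBgo pattern.toList true 0)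

-- ===== PRECONDITION & SPEC =====
def Spec_normalize_wildcard_pattern_py (pattern : String) (out : String) : Prop := out = normalize_wildcard_pattern_py_alt pattern
instance (pattern : String) (out : String) : Decidable (Spec_normalize_wildcard_pattern_py pattern out) := by unfold Spec_normalize_wildcard_pattern_py; infer_instance

-- ===== CLAIM (what is proved, stated in full; the proofs are below) =====
def Claim_equal_normalize_wildcard_pattern_py : Prop := ∀ (pattern : String), Dom_normalize_wildcard_pattern_py pattern → Spec_normalize_wildcard_pattern_py pattern (normalize_wildcard_pattern_py pattern)

-- ===== LEMMAS AND PROOFS =====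

-- structural single-char split on '/' (proof-side characterisation of splitOn)
def pvSplitD : List Char → List Char × List (List Char)
  | [] => ([], [])
  | c :: rest =>
    if c = '/' then ([], (pvSplitD rest).1 :: (pvSplitD rest).2)
    else (c :: (pvSplitD rest).1, (pvSplitD rest).2)

lemma splitOn_go_char (l : List Char) : ∀ (fuel : Nat) (cur : List Char) (acc : List (List Char)),
    l.length ≤ fuel →
    PySem.Chars.splitOn.go ['/'] fuel l cur acc
      = acc.reverse ++ (cur.reverse ++ (pvSplitD l).1) :: (pvSplitD l).2 := by
  induction l with
  | nil =>
    intro fuel cur acc _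
    cases fuel <;> simp [PySem.Chars.splitOn.go, pvSplitD]
  | cons c rest ih =>
    intro fuel cur acc hf
    cases fuel with
    | zero => simp at hf
    | succ f =>
      rw [PySem.Chars.splitOn.go.eq_def]
      have hlen : rest.length ≤ f := by simp at hf; omega
      by_cases h : c = '/'
      · subst h
        have hgo := ih f [] (cur.reverse :: acc) hlen
        simp [List.isPrefixOf, hgo, pvSplitD]
      · have hne : ('/' : Char) ≠ c := fun hh => h hh.symm
        have hgo := ih f (c :: cur) acc hlen
        simp [List.isPrefixOf, hne, hgo, pvSplitD, h]

lemma splitOn_char (l : List Char) :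
    PySem.Chars.splitOn l ['/'] = (pvSplitD l).1 :: (pvSplitD l).2 := by
  unfold PySem.Chars.splitOn
  rw [splitOn_go_char l (l.length + 1) [] [] (by omega)]
  simp

-- join of the A-side processed segments, as one function of the segment pair
def pvJ (segs : List (List Char)) (k : Int) : List Char :=
  PySem.Chars.join ['/'] (pvAgo segs k)

lemma pvAgo_cons (s : List Char) (ss : List (List Char)) (k : Int) :
    pvAgo (s :: ss) k =
      (if s = ['*'] then ":var".toList ++ PySem.Int.toChars (k + 1) else s)
        :: pvAgo ss (if s = ['*'] then k + 1 else k) := by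
  by_cases h : s = ['*'] <;> simp [pvAgo, h]

lemma pvJ_cons (s : List Char) (ss : List (List Char)) (k : Int) :
    pvJ (s :: ss) k =
      (if s = ['*'] then ":var".toList ++ PySem.Int.toChars (k + 1) else s)
        ++ (if ss = [] then []
            else '/' :: pvJ ss (if s = ['*'] then k + 1 else k)) := by
  cases ss with
  | nil => by_cases h : s = ['*'] <;> simp [pvJ, pvAgo, h, PySem.Chars.join_singleton]
  | cons t ts =>
    rw [pvJ, pvAgo_cons s (t :: ts) k, pvAgo_cons t ts, PySem.Chars.join_cons_cons,
      ← pvAgo_cons t ts, ← pvJ]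
    simp

-- the joint loop invariant: boundary state (.1) and mid-segment state (.2)
lemma pvBgo_eq_pvJ : ∀ (n : Nat) (l : List Char), l.length ≤ n → ∀ (k : Int),
    (pvBgo l true k = pvJ ((pvSplitD l).1 :: (pvSplitD l).2) k) ∧
    (pvBgo l false k = (pvSplitD l).1
        ++ (if (pvSplitD l).2 = [] then []
            else '/' :: pvJ (pvSplitD l).2 k)) := by
  intro n
  induction n with
  | zero =>
    intro l hl k
    have : l = [] := List.length_eq_zero_iff.mp (Nat.le_zero.mp hl)
    subst this
    simp [pvBgo, pvSplitD, pvJ_cons]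
  | succ m ih =>
    intro l hl k
    cases l with
    | nil => simp [pvBgo, pvSplitD, pvJ_cons]
    | cons c rest =>
      have hrest : rest.length ≤ m := by simpa using Nat.succ_le_succ_iff.mp hl
      by_cases hc : c = '/'
      · -- '/' never fires; boundary becomes true
        subst hc
        have hT : pvBgo ('/' :: rest) true k = '/' :: pvBgo rest true k := by
          simp [pvBgo]
        have hF : pvBgo ('/' :: rest) false k = '/' :: pvBgo rest true k := by
          simp [pvBgo]
        have hP := (ih rest hrest k).1
        constructor
        · rw [hT, hP]
          simp [pvSplitD, pvJ_cons]
        · rw [hF, hP]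
          simp [pvSplitD]
      · by_cases hstar : c = '*' ∧ (rest.head? = none ∨ rest.head? = some '/')
        · obtain ⟨hc', hhead⟩ := hstar
          subst hc'
          constructor
          · -- fires
            have hfire : pvBgo ('*' :: rest) true k
                = (":var".toList ++ PySem.Int.toChars (k + 1)) ++ pvBgo rest false (k + 1) := by
              simp only [pvBgo]
              rw [if_pos ⟨trivial, trivial, hhead⟩]
            rw [hfire]
            cases rest with
            | nil => simp [pvBgo, pvSplitD, pvJ_cons]
            | cons d l' =>
              have hd : d = '/' := by
                rcases hhead with h1 | h1 <;> simp_all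
              subst hd
              have hl' : l'.length ≤ m := by simp at hrest; omega
              have hPl' := (ih l' hl' (k + 1)).1
              have hstep : pvBgo ('/' :: l') false (k + 1) = '/' :: pvBgo l' true (k + 1) := by
                simp [pvBgo]
              rw [hstep, hPl']
              simp [pvSplitD, pvJ_cons]
          · -- '*' does not fire with atB = false
            have hskip : pvBgo ('*' :: rest) false k = '*' :: pvBgo rest false k := by
              simp [pvBgo]
            rw [hskip, (ih rest hrest k).2]
            simp [pvSplitD]
        · -- ordinary character (or '*' not at a whole-segment position): copied in both states
          have hno : ∀ b, pvBgo (c :: rest) b k = c :: pvBgo rest false k := by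
            intro b
            simp only [pvBgo]
            rw [if_neg (by rintro ⟨h1, _, h3⟩; exact hstar ⟨h1, h3⟩)]
            simp [hc]
          have hQ := (ih rest hrest k).2
          have hmid : (pvSplitD (c :: rest)).1 = c :: (pvSplitD rest).1 ∧
              (pvSplitD (c :: rest)).2 = (pvSplitD rest).2 := by
            simp [pvSplitD, hc]
          have hne : c :: (pvSplitD rest).1 ≠ ['*'] := by
            intro h
            injection h with ha hb
            apply hstar
            refine ⟨ha, ?_⟩
            cases rest with
            | nil => left; rfl
            | cons d l' =>
              right
              by_cases hd : d = '/'
              · simp [hd]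
              · exfalso
                simp [pvSplitD, hd] at hb
          constructor
          · rw [hno true, hQ, hmid.1, hmid.2, pvJ_cons]
            simp [hne]
          · rw [hno false, hQ, hmid.1, hmid.2]
            simp

lemma pvBgo_no_star (l : List Char) (h : '*' ∉ l) : ∀ b k, pvBgo l b k = l := by
  induction l with
  | nil => intro b k; simp [pvBgo]
  | cons c rest ih =>
    intro b k
    have hc : c ≠ '*' := fun hh => h (hh ▸ List.mem_cons_self)
    simp only [pvBgo]
    rw [if_neg (by rintro ⟨h1, _⟩; exact hc h1)]
    simp [ih (fun hm => h (List.mem_cons_of_mem _ hm))]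

-- ===== VERDICT (by name: the statement is the Claim_ definition above) =====
theorem normalize_wildcard_pattern_py_spec : Claim_equal_normalize_wildcard_pattern_py := by
  intro pattern _
  unfold Spec_normalize_wildcard_pattern_py
  unfold normalize_wildcard_pattern_py normalize_wildcard_pattern_py_alt
  by_cases hin : PySem.Str.isIn "*" pattern = false
  · -- no '*' anywhere: B copies the string unchanged
    have hmem : '*' ∉ pattern.toList := by
      intro hm
      have h2 : PySem.Str.isIn "*" pattern = true := by
        rw [PySem.Str.isIn_iff_infix]
        simpa using (List.singleton_infix_iff '*' pattern.toList).mpr hm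
      exact absurd (h2.symm.trans hin) (by decide)
    rw [if_pos hin, pvBgo_no_star pattern.toList hmem true 0]
    exact (String.ofList_toList).symm
  · rw [if_neg hin]
    have hmain := (pvBgo_eq_pvJ pattern.toList.length pattern.toList le_rfl 0).1
    rw [hmain]
    rw [splitOn_char pattern.toList]
    rfl
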